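-- pv_equiv track=rewrite | github.com/dalmuri/Algorithm | 프로그래머스/3/92344. 파괴되지 않은 건물/파괴되지 않은 건물.py | solution
-- ===== SOURCE A (Python) =====
-- def solution(board, skill):
--     n = len(board)
--     m = len(board[0])
--     prefix_sum = [[0] * (m + 1) for i in range(n + 1)]
--     for sk in skill:
--         degree = sk[5]
--         if sk[0] == 1 : degree *= -1
--
--         prefix_sum[sk[1]][sk[2]] += degree
--         prefix_sum[sk[1]][sk[4] + 1] -= degree
--         prefix_sum[sk[3] + 1][sk[2]] -= degree
--         prefix_sum[sk[3] + 1][sk[4] + 1] += degree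
--
--
--     answer = 0
--     for i in range(n):
--         for j in range(m):
--             if i > 0: prefix_sum[i][j] += prefix_sum[i - 1][j]
--             if j > 0: prefix_sum[i][j] += prefix_sum[i][j - 1]
--             if i > 0 and j > 0: prefix_sum[i][j] -= prefix_sum[i - 1][j - 1]
--
--             if board[i][j] + prefix_sum[i][j] > 0:
--                 answer += 1
--
--     return answer
-- ===== SOURCE B (Python) =====
-- def solution(board, skill):
--     n, m = len(board), len(board[0])
--     changes = [(-sk[5] if sk[0] == 1 else sk[5], sk[1], sk[2], sk[3], sk[4])
--                for sk in skill]
--     answer = 0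
--     for i in range(n):
--         for j in range(m):
--             e = sum(d for d, r1, c1, r2, c2 in changes
--                     if r1 <= i <= r2 and c1 <= j <= c2)
--             if board[i][j] + e > 0:
--                 answer += 1
--     return answer
-- ===== Notes on version B (the rewrite author's own statement) =====
-- stated objective: simpler
-- what changed: B drops the (n+1)x(m+1) corner-mark grid and the in-place 2D prefix-sum reconstruction entirely: it normalizes each skill to a signed rectangle once and, in a single scan over the n x m grid, sums the degrees of the rectangles covering each cell directly.
-- outside the precondition, e.g. on solution([[1], [1], [1]], [[2, 2, 0, 0, 0, 5]]): A returns 2, B returns 3; on solution([[0, 0]], [[2, 0, -2, 0, -2, 1]]): A returns 1, B returns 0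
import Mathlib
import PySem

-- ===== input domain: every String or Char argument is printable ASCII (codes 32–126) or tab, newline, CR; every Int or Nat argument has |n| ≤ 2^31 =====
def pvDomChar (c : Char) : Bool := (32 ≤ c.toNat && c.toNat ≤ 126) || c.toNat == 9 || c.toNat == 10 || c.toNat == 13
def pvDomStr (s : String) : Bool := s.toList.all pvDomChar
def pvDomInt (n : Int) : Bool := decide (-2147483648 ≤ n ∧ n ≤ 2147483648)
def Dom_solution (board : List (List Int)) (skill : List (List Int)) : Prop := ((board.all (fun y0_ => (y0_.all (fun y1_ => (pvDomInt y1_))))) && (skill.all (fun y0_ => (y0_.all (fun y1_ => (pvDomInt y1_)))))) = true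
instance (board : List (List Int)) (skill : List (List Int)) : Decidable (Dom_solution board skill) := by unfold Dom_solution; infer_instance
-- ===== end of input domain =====

-- B replaces A's corner-mark grid + in-place 2D prefix-sum reconstruction by a direct
-- per-cell sum of the signed degrees of the rectangles covering the cell (simpler, no grids).

-- ===== PORT A =====
-- grid cell read: g[i][j] (pyGetD/pySetD are exact for the non-negative in-range indices Pre_ admits)
def pvG2 (g : List (List Int)) (i j : Int) : Int :=
  PySem.List.pyGetD (PySem.List.pyGetD g i []) j 0

-- grid cell increment: g[i][j] += d
def pvA2 (g : List (List Int)) (i j d : Int) : List (List Int) :=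
  PySem.List.pySetD g i (PySem.List.pySetD (PySem.List.pyGetD g i []) j (pvG2 g i j + d))

def solution (board : List (List Int)) (skill : List (List Int)) : Int :=
  let n := board.length
  let m := (PySem.List.pyGetD board 0 []).length
  let P0 := List.replicate (n+1) (List.replicate (m+1) (0:Int))
  let P1 := skill.foldl (fun P sk =>
    let d0 := PySem.List.pyGetD sk 5 0
    let degree := if PySem.List.pyGetD sk 0 0 = 1 then -d0 else d0
    let P := pvA2 P (PySem.List.pyGetD sk 1 0) (PySem.List.pyGetD sk 2 0) degree
    let P := pvA2 P (PySem.List.pyGetD sk 1 0) (PySem.List.pyGetD sk 4 0 + 1) (-degree)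
    let P := pvA2 P (PySem.List.pyGetD sk 3 0 + 1) (PySem.List.pyGetD sk 2 0) (-degree)
    pvA2 P (PySem.List.pyGetD sk 3 0 + 1) (PySem.List.pyGetD sk 4 0 + 1) degree) P0
  let res := (List.range n).foldl (fun st (i : Nat) =>
    (List.range m).foldl (fun (st : List (List Int) × Int) (j : Nat) =>
      let P := st.1
      let P := if 0 < i then pvA2 P (i:Int) (j:Int) (pvG2 P ((i:Int)-1) (j:Int)) else P
      let P := if 0 < j then pvA2 P (i:Int) (j:Int) (pvG2 P (i:Int) ((j:Int)-1)) else P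
      let P := if 0 < i ∧ 0 < j then pvA2 P (i:Int) (j:Int) (-(pvG2 P ((i:Int)-1) ((j:Int)-1))) else P
      let ans := if pvG2 board (i:Int) (j:Int) + pvG2 P (i:Int) (j:Int) > 0 then st.2 + 1 else st.2
      (P, ans)) st) (P1, (0:Int))
  res.2

-- ===== PORT B =====
def solution_alt (board : List (List Int)) (skill : List (List Int)) : Int :=
  let n := board.length
  let m := (PySem.List.pyGetD board 0 []).length
  let changes := skill.map (fun sk =>
    (if PySem.List.pyGetD sk 0 0 = 1 then -(PySem.List.pyGetD sk 5 0) else PySem.List.pyGetD sk 5 0,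
     PySem.List.pyGetD sk 1 0, PySem.List.pyGetD sk 2 0,
     PySem.List.pyGetD sk 3 0, PySem.List.pyGetD sk 4 0))
  (List.range n).foldl (fun ans (i : Nat) =>
    (List.range m).foldl (fun (ans : Int) (j : Nat) =>
      let e := changes.foldl (fun e (c : Int × Int × Int × Int × Int) =>
        if c.2.1 ≤ (i:Int) ∧ (i:Int) ≤ c.2.2.2.1 ∧ c.2.2.1 ≤ (j:Int) ∧ (j:Int) ≤ c.2.2.2.2
        then e + c.1 else e) 0
      if PySem.List.pyGetD (PySem.List.pyGetD board (i:Int) []) (j:Int) 0 + e > 0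
      then ans + 1 else ans) ans) 0

-- ===== PRECONDITION & SPEC =====
-- Pre_ excludes: inputs where A raises (empty board, a row shorter than row 0, a skill list
-- entry shorter than 6, rectangle coordinates beyond the (n+1)x(m+1) mark grid), and inputs
-- where A still returns but only via accidents of the corner trick: negative coordinates
-- (Python negative-index wraparound) and reversed rectangles with r1 > r2+1 or c1 > c2+1,
-- whose four corner marks reconstruct to a spurious negated band (see cites).
def Pre_solution (board : List (List Int)) (skill : List (List Int)) : Prop :=
  board ≠ [] ∧
  (∀ row ∈ board, (board.headD []).length ≤ row.length) ∧
  (∀ sk ∈ skill, 6 ≤ sk.length ∧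
     0 ≤ PySem.List.pyGetD sk 1 0 ∧ PySem.List.pyGetD sk 1 0 ≤ PySem.List.pyGetD sk 3 0 + 1 ∧
     PySem.List.pyGetD sk 3 0 + 1 ≤ (board.length : Int) ∧
     0 ≤ PySem.List.pyGetD sk 2 0 ∧ PySem.List.pyGetD sk 2 0 ≤ PySem.List.pyGetD sk 4 0 + 1 ∧
     PySem.List.pyGetD sk 4 0 + 1 ≤ ((board.headD []).length : Int))
instance (board : List (List Int)) (skill : List (List Int)) : Decidable (Pre_solution board skill) := by
  unfold Pre_solution; infer_instance

def pvWitness_solution : List (List Int) × List (List Int) :=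
  ([[1, 2], [0, 3]], [[1, 0, 0, 1, 1, 1]])

def Spec_solution (board : List (List Int)) (skill : List (List Int)) (out : Int) : Prop := out = solution_alt board skill
instance (board : List (List Int)) (skill : List (List Int)) (out : Int) : Decidable (Spec_solution board skill out) := by unfold Spec_solution; infer_instance

-- ===== CLAIM (what is proved, stated in full; the proofs are below) =====
def Claim_equal_solution : Prop := ∀ (board : List (List Int)) (skill : List (List Int)), Dom_solution board skill → Pre_solution board skill → Spec_solution board skill (solution board skill)

-- ===== LEMMAS AND PROOFS =====

-- Nat-indexed grid view
def pvGet (g : List (List Int)) (r c : Nat) : Int := (g.getD r []).getD c 0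
def pvDims (g : List (List Int)) (N M : Nat) : Prop :=
  g.length = N ∧ ∀ r, r < N → (g.getD r []).length = M

-- skill field accessors (Nat form) and signed degree
def pvDeg (sk : List Int) : Int :=
  if PySem.List.pyGetD sk 0 0 = 1 then -(PySem.List.pyGetD sk 5 0) else PySem.List.pyGetD sk 5 0
def pvR1 (sk : List Int) : Nat := (PySem.List.pyGetD sk 1 0).toNat
def pvC1 (sk : List Int) : Nat := (PySem.List.pyGetD sk 2 0).toNat
def pvR2 (sk : List Int) : Nat := (PySem.List.pyGetD sk 3 0 + 1).toNat
def pvC2 (sk : List Int) : Nat := (PySem.List.pyGetD sk 4 0 + 1).toNat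

def pvSpike (a b : Nat) (v : Int) (r c : Nat) : Int := if r = a ∧ c = b then v else 0

def pvC4 (sk : List Int) (r c : Nat) : Int :=
  pvSpike (pvR1 sk) (pvC1 sk) (pvDeg sk) r c
  + pvSpike (pvR1 sk) (pvC2 sk) (-(pvDeg sk)) r c
  + pvSpike (pvR2 sk) (pvC1 sk) (-(pvDeg sk)) r c
  + pvSpike (pvR2 sk) (pvC2 sk) (pvDeg sk) r c

def pvCC (skill : List (List Int)) (r c : Nat) : Int :=
  (skill.map (fun sk => pvC4 sk r c)).sum

-- 2D prefix sum defined by A's reconstruction recurrence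
def pvQ (C : Nat → Nat → Int) : Nat → Nat → Int
  | 0, 0 => C 0 0
  | (i+1), 0 => C (i+1) 0 + pvQ C i 0
  | 0, (j+1) => C 0 (j+1) + pvQ C 0 j
  | (i+1), (j+1) => C (i+1) (j+1) + pvQ C i (j+1) + pvQ C (i+1) j - pvQ C i j

def pvRect (sk : List Int) (i j : Nat) : Int :=
  if pvR1 sk ≤ i ∧ i + 1 ≤ pvR2 sk ∧ pvC1 sk ≤ j ∧ j + 1 ≤ pvC2 sk then pvDeg sk else 0

def pvE (skill : List (List Int)) (i j : Nat) : Int :=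
  (skill.map (fun sk => pvRect sk i j)).sum

def pvCnt (board : List (List Int)) (m : Nat) (E : Nat → Nat → Int) : Int :=
  (List.range board.length).foldl (fun a i =>
    (List.range m).foldl (fun a j => if pvGet board i j + E i j > 0 then a + 1 else a) a) 0

-- named copies of the port's fold bodies (definitionally equal to the lambdas in `solution`)
def pvF1 (P : List (List Int)) (sk : List Int) : List (List Int) :=
  let d0 := PySem.List.pyGetD sk 5 0
  let degree := if PySem.List.pyGetD sk 0 0 = 1 then -d0 else d0
  let P := pvA2 P (PySem.List.pyGetD sk 1 0) (PySem.List.pyGetD sk 2 0) degree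
  let P := pvA2 P (PySem.List.pyGetD sk 1 0) (PySem.List.pyGetD sk 4 0 + 1) (-degree)
  let P := pvA2 P (PySem.List.pyGetD sk 3 0 + 1) (PySem.List.pyGetD sk 2 0) (-degree)
  pvA2 P (PySem.List.pyGetD sk 3 0 + 1) (PySem.List.pyGetD sk 4 0 + 1) degree

def pvInner (board : List (List Int)) (i : Nat) (st : List (List Int) × Int) (j : Nat) :
    List (List Int) × Int :=
  let P := st.1
  let P := if 0 < i then pvA2 P (i:Int) (j:Int) (pvG2 P ((i:Int)-1) (j:Int)) else P
  let P := if 0 < j then pvA2 P (i:Int) (j:Int) (pvG2 P (i:Int) ((j:Int)-1)) else P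
  let P := if 0 < i ∧ 0 < j then pvA2 P (i:Int) (j:Int) (-(pvG2 P ((i:Int)-1) ((j:Int)-1))) else P
  let ans := if pvG2 board (i:Int) (j:Int) + pvG2 P (i:Int) (j:Int) > 0 then st.2 + 1 else st.2
  (P, ans)

def pvOuter (board : List (List Int)) (m : Nat) (st : List (List Int) × Int) (i : Nat) :
    List (List Int) × Int :=
  (List.range m).foldl (pvInner board i) st

theorem solution_eq (board skill : List (List Int)) :
    solution board skill =
      ((List.range board.length).foldl (pvOuter board (PySem.List.pyGetD board 0 []).length)
        (skill.foldl pvF1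
          (List.replicate (board.length + 1)
            (List.replicate ((PySem.List.pyGetD board 0 []).length + 1) (0:Int))), 0)).2 := by
  unfold solution pvOuter pvInner pvF1
  rfl

theorem pvGetD_set {a : Type} (xs : List a) (k r : Nat) (v dflt : a) :
    (xs.set k v).getD r dflt = if k = r ∧ r < xs.length then v else xs.getD r dflt := by
  rw [List.getD_eq_getElem?_getD, List.getElem?_set]
  split_ifs with h1 h2 h3 h4 <;>
    simp_all [List.getD_eq_getElem?_getD]

theorem pvA2_eq_set (g : List (List Int)) (k l : Nat) (d : Int) :
    pvA2 g (k:Int) (l:Int) d = g.set k ((g.getD k []).set l (pvGet g k l + d)) := by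
  simp [pvA2, pvG2, pvGet, PySem.List.pySetD_natCast, PySem.List.pyGetD_natCast]

theorem pvGet_set (g : List (List Int)) (N M : Nat) (hd : pvDims g N M)
    (k l : Nat) (hk : k < N) (hl : l < M) (d : Int) (r c : Nat) :
    pvGet (pvA2 g (k:Int) (l:Int) d) r c = pvGet g r c + pvSpike k l d r c := by
  obtain ⟨hlen, hrow⟩ := hd
  rw [pvA2_eq_set]
  unfold pvGet pvSpike
  rw [pvGetD_set]
  by_cases hr : r = k
  · subst hr
    rw [if_pos ⟨rfl, by omega⟩, pvGetD_set]
    have hM := hrow r hk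
    by_cases hc : c = l
    · subst hc
      rw [if_pos ⟨rfl, by omega⟩, if_pos ⟨rfl, rfl⟩]
    · rw [if_neg (fun h => hc h.1.symm), if_neg (fun h => hc h.2)]
      simp
  · rw [if_neg (fun h => hr h.1.symm), if_neg (fun h => hr h.1)]
    simp

theorem pvDims_set (g : List (List Int)) (N M : Nat) (hd : pvDims g N M)
    (k l : Nat) (hk : k < N) (d : Int) :
    pvDims (pvA2 g (k:Int) (l:Int) d) N M := by
  obtain ⟨hlen, hrow⟩ := hd
  rw [pvA2_eq_set]
  refine ⟨by simpa using hlen, ?_⟩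
  intro r hr
  by_cases hkr : r = k
  · subst hkr
    rw [List.getD_eq_getElem?_getD, List.getElem?_set_self (by omega)]
    simpa using hrow r hr
  · rw [List.getD_eq_getElem?_getD, List.getElem?_set_ne (by omega : k ≠ r),
      ← List.getD_eq_getElem?_getD]
    exact hrow r hr

theorem pvQ_add (C1 C2 : Nat → Nat → Int) :
    ∀ i j, pvQ (fun r c => C1 r c + C2 r c) i j = pvQ C1 i j + pvQ C2 i j := by
  intro i
  induction i with
  | zero =>
    intro j
    induction j with
    | zero => simp [pvQ]
    | succ j ihj => simp [pvQ, ihj]; ring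
  | succ i ihi =>
    intro j
    induction j with
    | zero => simp [pvQ, ihi 0]; ring
    | succ j ihj => simp [pvQ, ihi, ihj]; ring

theorem pvQ_zero : ∀ i j, pvQ (fun _ _ => (0:Int)) i j = 0 := by
  intro i
  induction i with
  | zero =>
    intro j
    induction j with
    | zero => simp [pvQ]
    | succ j ihj => simp [pvQ, ihj]
  | succ i ihi =>
    intro j
    induction j with
    | zero => simp [pvQ, ihi 0]
    | succ j ihj => simp [pvQ, ihi, ihj]

theorem pvQ_spike (a b : Nat) (v : Int) :
    ∀ i j, pvQ (pvSpike a b v) i j = if a ≤ i ∧ b ≤ j then v else 0 := by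
  intro i
  induction i with
  | zero =>
    intro j
    induction j with
    | zero => simp only [pvQ, pvSpike]; split_ifs <;> omega
    | succ j ihj =>
      simp only [pvQ, pvSpike, ihj]; split_ifs <;> omega
  | succ i ihi =>
    intro j
    induction j with
    | zero =>
      simp only [pvQ, pvSpike, ihi 0]; split_ifs <;> omega
    | succ j ihj =>
      simp only [pvQ, pvSpike, ihi, ihj]; split_ifs <;> omega

theorem pvQ_c4 (sk : List Int) (h1 : pvR1 sk ≤ pvR2 sk) (h2 : pvC1 sk ≤ pvC2 sk) :
    ∀ i j, pvQ (pvC4 sk) i j = pvRect sk i j := by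
  intro i j
  have e : pvC4 sk = fun r c =>
      pvSpike (pvR1 sk) (pvC1 sk) (pvDeg sk) r c +
      (pvSpike (pvR1 sk) (pvC2 sk) (-(pvDeg sk)) r c +
       (pvSpike (pvR2 sk) (pvC1 sk) (-(pvDeg sk)) r c +
        pvSpike (pvR2 sk) (pvC2 sk) (pvDeg sk) r c)) := by
    funext r c; simp [pvC4]; ring
  rw [e, pvQ_add, pvQ_add, pvQ_add, pvQ_spike, pvQ_spike, pvQ_spike, pvQ_spike]
  unfold pvRect
  split_ifs <;> omega

theorem pvQ_list (skill : List (List Int))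
    (hsk : ∀ sk ∈ skill, pvR1 sk ≤ pvR2 sk ∧ pvC1 sk ≤ pvC2 sk) :
    ∀ i j, pvQ (pvCC skill) i j = pvE skill i j := by
  induction skill with
  | nil =>
    intro i j
    have e : pvCC ([] : List (List Int)) = fun _ _ => (0:Int) := by
      funext r c; simp [pvCC]
    simp [pvE, e, pvQ_zero]
  | cons sk l ih =>
    intro i j
    have e : pvCC (sk :: l) = fun r c => pvC4 sk r c + pvCC l r c := by
      funext r c; simp [pvCC]
    rw [e, pvQ_add, pvQ_c4 sk (hsk sk (by simp)).1 (hsk sk (by simp)).2,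
      ih (fun s hs => hsk s (by simp [hs]))]
    simp [pvE]

def pvSkOK (N M : Nat) (sk : List Int) : Prop :=
  0 ≤ PySem.List.pyGetD sk 1 0 ∧ PySem.List.pyGetD sk 1 0 ≤ PySem.List.pyGetD sk 3 0 + 1 ∧
  PySem.List.pyGetD sk 3 0 + 1 ≤ (N:Int) ∧ 0 ≤ PySem.List.pyGetD sk 2 0 ∧
  PySem.List.pyGetD sk 2 0 ≤ PySem.List.pyGetD sk 4 0 + 1 ∧ PySem.List.pyGetD sk 4 0 + 1 ≤ (M:Int)

theorem pvF1_step (N M : Nat) (sk : List Int) (hok : pvSkOK N M sk)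
    (P : List (List Int)) (hd : pvDims P (N+1) (M+1)) :
    pvDims (pvF1 P sk) (N+1) (M+1) ∧
    ∀ r c, pvGet (pvF1 P sk) r c = pvGet P r c + pvC4 sk r c := by
  obtain ⟨o1, o2, o3, o4, o5, o6⟩ := hok
  have hb1 : pvR1 sk ≤ pvR2 sk := by unfold pvR1 pvR2; omega
  have hb2 : pvR2 sk < N + 1 := by unfold pvR2; omega
  have hb3 : pvC1 sk ≤ pvC2 sk := by unfold pvC1 pvC2; omega
  have hb4 : pvC2 sk < M + 1 := by unfold pvC2; omega
  have e1 : PySem.List.pyGetD sk 1 0 = ((pvR1 sk : Nat) : Int) := by unfold pvR1; omega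
  have e2 : PySem.List.pyGetD sk 2 0 = ((pvC1 sk : Nat) : Int) := by unfold pvC1; omega
  have e3 : PySem.List.pyGetD sk 3 0 + 1 = ((pvR2 sk : Nat) : Int) := by unfold pvR2; omega
  have e4 : PySem.List.pyGetD sk 4 0 + 1 = ((pvC2 sk : Nat) : Int) := by unfold pvC2; omega
  have ef : pvF1 P sk =
      pvA2 (pvA2 (pvA2 (pvA2 P (PySem.List.pyGetD sk 1 0) (PySem.List.pyGetD sk 2 0) (pvDeg sk))
            (PySem.List.pyGetD sk 1 0) (PySem.List.pyGetD sk 4 0 + 1) (-(pvDeg sk)))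
          (PySem.List.pyGetD sk 3 0 + 1) (PySem.List.pyGetD sk 2 0) (-(pvDeg sk)))
        (PySem.List.pyGetD sk 3 0 + 1) (PySem.List.pyGetD sk 4 0 + 1) (pvDeg sk) := rfl
  rw [ef, e1, e2, e3, e4]
  have d1 := pvDims_set P (N+1) (M+1) hd (pvR1 sk) (pvC1 sk) (by omega) (pvDeg sk)
  have d2 := pvDims_set _ (N+1) (M+1) d1 (pvR1 sk) (pvC2 sk) (by omega) (-(pvDeg sk))
  have d3 := pvDims_set _ (N+1) (M+1) d2 (pvR2 sk) (pvC1 sk) (by omega) (-(pvDeg sk))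
  have d4 := pvDims_set _ (N+1) (M+1) d3 (pvR2 sk) (pvC2 sk) (by omega) (pvDeg sk)
  refine ⟨d4, ?_⟩
  intro r c
  rw [pvGet_set _ (N+1) (M+1) d3 _ _ (by omega) (by omega),
    pvGet_set _ (N+1) (M+1) d2 _ _ (by omega) (by omega),
    pvGet_set _ (N+1) (M+1) d1 _ _ (by omega) (by omega),
    pvGet_set _ (N+1) (M+1) hd _ _ (by omega) (by omega)]
  unfold pvC4
  ring

theorem pvPhase1 (N M : Nat) (skill : List (List Int))
    (hsk : ∀ sk ∈ skill, pvSkOK N M sk) :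
    ∀ P, pvDims P (N+1) (M+1) →
      pvDims (skill.foldl pvF1 P) (N+1) (M+1) ∧
      ∀ r c, pvGet (skill.foldl pvF1 P) r c = pvGet P r c + pvCC skill r c := by
  induction skill with
  | nil => intro P hd; exact ⟨hd, by simp [pvCC]⟩
  | cons sk l ih =>
    intro P hd
    obtain ⟨d1, g1⟩ := pvF1_step N M sk (hsk sk (by simp)) P hd
    obtain ⟨d2, g2⟩ := ih (fun s hs => hsk s (by simp [hs])) (pvF1 P sk) d1
    refine ⟨by simpa using d2, ?_⟩
    intro r c
    have : pvCC (sk :: l) r c = pvC4 sk r c + pvCC l r c := by simp [pvCC]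
    simp only [List.foldl_cons]
    rw [g2 r c, g1 r c, this]
    ring

theorem pvG2_cast (g : List (List Int)) (r c : Nat) :
    pvG2 g (r:Int) (c:Int) = pvGet g r c := by
  simp [pvG2, pvGet, PySem.List.pyGetD_natCast]

theorem pvStage (P : List (List Int)) (n m i j : Nat) (hi : i < n) (hj : j < m)
    (hdP : pvDims P (n+1) (m+1)) (w : Int) (cond : Prop) [Decidable cond] :
    pvDims (if cond then pvA2 P (i:Int) (j:Int) w else P) (n+1) (m+1) ∧
    ∀ r c, pvGet (if cond then pvA2 P (i:Int) (j:Int) w else P) r c =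
      pvGet P r c + pvSpike i j (if cond then w else 0) r c := by
  by_cases h : cond
  · simp only [if_pos h]
    exact ⟨pvDims_set P _ _ hdP i j (by omega) w,
      fun r c => pvGet_set P _ _ hdP i j (by omega) (by omega) w r c⟩
  · simp only [if_neg h]
    refine ⟨hdP, fun r c => ?_⟩
    unfold pvSpike
    split_ifs <;> simp

def pvInv (skill : List (List Int)) (n m : Nat) (P : List (List Int)) (i j : Nat) : Prop :=
  pvDims P (n+1) (m+1) ∧
  (∀ r c, r < n → c < m → (r < i ∨ (r = i ∧ c < j)) → pvGet P r c = pvQ (pvCC skill) r c) ∧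
  (∀ r c, r < n+1 → c < m+1 → ¬(c < m ∧ r < n ∧ (r < i ∨ (r = i ∧ c < j))) →
    pvGet P r c = pvCC skill r c)

theorem pvSpike_add (i j : Nat) (a b : Int) (r c : Nat) :
    pvSpike i j a r c + pvSpike i j b r c = pvSpike i j (a+b) r c := by
  unfold pvSpike; split_ifs <;> ring

theorem pvStep (skill : List (List Int)) (n m : Nat) (board : List (List Int))
    (i j : Nat) (hi : i < n) (hj : j < m) (P : List (List Int)) (ans : Int)
    (hP : pvInv skill n m P i j) :
    pvInv skill n m (pvInner board i (P, ans) j).1 i (j+1) ∧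
    (pvInner board i (P, ans) j).2 =
      (if pvGet board i j + pvQ (pvCC skill) i j > 0 then ans + 1 else ans) := by
  obtain ⟨hdP, hproc, hun⟩ := hP
  have ei : 0 < i → ((i:Int) - 1) = ((i - 1 : Nat) : Int) := by omega
  have ej : 0 < j → ((j:Int) - 1) = ((j - 1 : Nat) : Int) := by omega
  have S1 := pvStage P n m i j hi hj hdP (pvG2 P ((i:Int)-1) (j:Int)) (0 < i)
  set P1 := (if 0 < i then pvA2 P (i:Int) (j:Int) (pvG2 P ((i:Int)-1) (j:Int)) else P) with hP1
  have S2 := pvStage P1 n m i j hi hj S1.1 (pvG2 P1 (i:Int) ((j:Int)-1)) (0 < j)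
  set P2 := (if 0 < j then pvA2 P1 (i:Int) (j:Int) (pvG2 P1 (i:Int) ((j:Int)-1)) else P1) with hP2
  have S3 := pvStage P2 n m i j hi hj S2.1 (-(pvG2 P2 ((i:Int)-1) ((j:Int)-1))) (0 < i ∧ 0 < j)
  set P3 := (if 0 < i ∧ 0 < j then pvA2 P2 (i:Int) (j:Int) (-(pvG2 P2 ((i:Int)-1) ((j:Int)-1))) else P2) with hP3
  have hInner : pvInner board i (P, ans) j =
      (P3, if pvG2 board (i:Int) (j:Int) + pvG2 P3 (i:Int) (j:Int) > 0 then ans + 1 else ans) := rfl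
  -- the three read values are already-reconstructed prefix values
  have w1 : 0 < i → pvG2 P ((i:Int)-1) (j:Int) = pvQ (pvCC skill) (i-1) j := by
    intro h0; rw [ei h0, pvG2_cast]
    exact hproc (i-1) j (by omega) hj (by omega)
  have w2 : 0 < j → pvG2 P1 (i:Int) ((j:Int)-1) = pvQ (pvCC skill) i (j-1) := by
    intro h0; rw [ej h0, pvG2_cast, S1.2 i (j-1)]
    have hs : pvSpike i j (if 0 < i then pvG2 P ((i:Int)-1) (j:Int) else 0) i (j-1) = 0 := by
      unfold pvSpike; rw [if_neg (by omega)]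
    rw [hs, add_zero]
    exact hproc i (j-1) hi (by omega) (by omega)
  have w3 : 0 < i → 0 < j → pvG2 P2 ((i:Int)-1) ((j:Int)-1) = pvQ (pvCC skill) (i-1) (j-1) := by
    intro h0i h0j; rw [ei h0i, ej h0j, pvG2_cast, S2.2 (i-1) (j-1), S1.2 (i-1) (j-1)]
    have hs1 : pvSpike i j (if 0 < i then pvG2 P ((i:Int)-1) (j:Int) else 0) (i-1) (j-1) = 0 := by
      unfold pvSpike; rw [if_neg (by omega)]
    have hs2 : pvSpike i j (if 0 < j then pvG2 P1 (i:Int) ((j:Int)-1) else 0) (i-1) (j-1) = 0 := by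
      unfold pvSpike; rw [if_neg (by omega)]
    rw [hs1, hs2, add_zero, add_zero]
    exact hproc (i-1) (j-1) (by omega) (by omega) (by omega)
  -- combined pointwise description of the grid after the three updates
  have r1 : (if 0 < i then pvG2 P ((i:Int)-1) (j:Int) else 0) =
      (if 0 < i then pvQ (pvCC skill) (i-1) j else 0) := by
    by_cases h : 0 < i <;> simp [h, w1]
  have r2 : (if 0 < j then pvG2 P1 (i:Int) ((j:Int)-1) else 0) =
      (if 0 < j then pvQ (pvCC skill) i (j-1) else 0) := by
    by_cases h : 0 < j <;> simp [h, w2]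
  have r3 : (if 0 < i ∧ 0 < j then -(pvG2 P2 ((i:Int)-1) ((j:Int)-1)) else 0) =
      (if 0 < i ∧ 0 < j then -(pvQ (pvCC skill) (i-1) (j-1)) else 0) := by
    by_cases h : 0 < i ∧ 0 < j <;> simp [h]
    exact w3 h.1 h.2
  have hget3 : ∀ r c, pvGet P3 r c = pvGet P r c +
      pvSpike i j ((if 0 < i then pvQ (pvCC skill) (i-1) j else 0) +
        (if 0 < j then pvQ (pvCC skill) i (j-1) else 0) +
        (if 0 < i ∧ 0 < j then -(pvQ (pvCC skill) (i-1) (j-1)) else 0)) r c := by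
    intro r c
    rw [S3.2 r c, S2.2 r c, S1.2 r c, r1, r2, r3, add_assoc, pvSpike_add, add_assoc, pvSpike_add]
    congr 2
    ring
  have hPij : pvGet P i j = pvCC skill i j := hun i j (by omega) (by omega) (by omega)
  have hQV : pvGet P3 i j = pvQ (pvCC skill) i j := by
    rw [hget3 i j, hPij]
    unfold pvSpike
    rw [if_pos ⟨rfl, rfl⟩]
    rcases i with _ | i' <;> rcases j with _ | j' <;> · simp [pvQ]; try ring
  rw [hInner]
  refine ⟨⟨S3.1, ?_, ?_⟩, ?_⟩
  · intro r c hr hc hcond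
    by_cases hrc : r = i ∧ c = j
    · obtain ⟨h1, h2⟩ := hrc; subst h1; subst h2; exact hQV
    · have hs : ∀ v, pvSpike i j v r c = 0 := fun v => by unfold pvSpike; rw [if_neg hrc]
      rw [hget3 r c, hs, add_zero]
      exact hproc r c hr hc (by omega)
  · intro r c hr hc hcond
    have hrc : ¬(r = i ∧ c = j) := by omega
    have hs : ∀ v, pvSpike i j v r c = 0 := fun v => by unfold pvSpike; rw [if_neg hrc]
    rw [hget3 r c, hs, add_zero]
    exact hun r c hr hc (by omega)
  · rw [pvG2_cast board i j, pvG2_cast P3 i j, hQV]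

theorem pvInnerFold (skill : List (List Int)) (n m : Nat) (board : List (List Int))
    (i : Nat) (hi : i < n) :
    ∀ (jend : Nat), jend ≤ m → ∀ (P : List (List Int)) (ans : Int), pvInv skill n m P i 0 →
      pvInv skill n m (((List.range jend).foldl (pvInner board i) (P, ans)).1) i jend ∧
      ((List.range jend).foldl (pvInner board i) (P, ans)).2 =
        (List.range jend).foldl
          (fun a j => if pvGet board i j + pvQ (pvCC skill) i j > 0 then a + 1 else a) ans := by
  intro jend
  induction jend with
  | zero => intro _ P ans h; exact ⟨h, rfl⟩
  | succ jend ih =>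
    intro hle P ans h
    obtain ⟨ih1, ih2⟩ := ih (by omega) P ans h
    rw [List.range_succ, List.foldl_append, List.foldl_append]
    simp only [List.foldl_cons, List.foldl_nil]
    set st := (List.range jend).foldl (pvInner board i) (P, ans) with hst
    have hpair : st = (st.1, st.2) := rfl
    rw [hpair]
    obtain ⟨s1, s2⟩ := pvStep skill n m board i jend hi (by omega) st.1 st.2 ih1
    exact ⟨s1, by rw [s2, ih2]⟩

theorem pvInv_next (skill : List (List Int)) (n m : Nat) (P : List (List Int)) (i : Nat)
    (h : pvInv skill n m P i m) : pvInv skill n m P (i+1) 0 := by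
  obtain ⟨hd, hproc, hun⟩ := h
  refine ⟨hd, ?_, ?_⟩
  · intro r c hr hc hcond; exact hproc r c hr hc (by omega)
  · intro r c hr hc hcond; exact hun r c hr hc (by omega)

theorem pvOuterFold (skill : List (List Int)) (n m : Nat) (board : List (List Int)) :
    ∀ (iend : Nat), iend ≤ n → ∀ (P : List (List Int)) (ans : Int), pvInv skill n m P 0 0 →
      pvInv skill n m (((List.range iend).foldl (pvOuter board m) (P, ans)).1) iend 0 ∧
      ((List.range iend).foldl (pvOuter board m) (P, ans)).2 =
        (List.range iend).foldl (fun a i => (List.range m).foldl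
          (fun a j => if pvGet board i j + pvQ (pvCC skill) i j > 0 then a + 1 else a) a) ans := by
  intro iend
  induction iend with
  | zero => intro _ P ans h; exact ⟨h, rfl⟩
  | succ iend ih =>
    intro hle P ans h
    obtain ⟨ih1, ih2⟩ := ih (by omega) P ans h
    rw [List.range_succ, List.foldl_append, List.foldl_append]
    simp only [List.foldl_cons, List.foldl_nil]
    set st := (List.range iend).foldl (pvOuter board m) (P, ans) with hst
    have hpair : st = (st.1, st.2) := rfl
    rw [hpair]
    unfold pvOuter
    obtain ⟨s1, s2⟩ := pvInnerFold skill n m board iend (by omega) m (by omega) st.1 st.2 ih1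
    exact ⟨pvInv_next skill n m _ iend s1, by rw [s2, ih2]⟩

theorem pvGet_replicate (N M r c : Nat) :
    pvGet (List.replicate N (List.replicate M (0:Int))) r c = 0 := by
  unfold pvGet
  have h1 : (List.replicate N (List.replicate M (0:Int))).getD r [] =
      if r < N then List.replicate M 0 else [] := by
    rw [List.getD_eq_getElem?_getD, List.getElem?_replicate]
    split_ifs <;> simp
  rw [h1]
  split_ifs with h
  · rw [List.getD_eq_getElem?_getD, List.getElem?_replicate]
    split_ifs <;> simp
  · simp

theorem pvDims_replicate (N M : Nat) :
    pvDims (List.replicate N (List.replicate M (0:Int))) N M := by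
  refine ⟨by simp, fun r hr => ?_⟩
  rw [List.getD_eq_getElem?_getD, List.getElem?_replicate, if_pos hr]
  simp

theorem pvM_eq (board : List (List Int)) :
    PySem.List.pyGetD board 0 [] = board.headD [] := by
  cases board <;> simp [PySem.List.pyGetD_zero]

theorem solutionA (board skill : List (List Int))
    (hsk : ∀ sk ∈ skill, pvSkOK board.length (board.headD []).length sk) :
    solution board skill = pvCnt board (board.headD []).length (pvQ (pvCC skill)) := by
  rw [solution_eq, pvM_eq]
  set n := board.length with hn
  set m := (board.headD []).length with hm
  have hphase := pvPhase1 n m skill hsk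
    (List.replicate (n+1) (List.replicate (m+1) (0:Int))) (pvDims_replicate (n+1) (m+1))
  have hinv : pvInv skill n m
      (skill.foldl pvF1 (List.replicate (n+1) (List.replicate (m+1) (0:Int)))) 0 0 := by
    refine ⟨hphase.1, ?_, ?_⟩
    · intro r c hr hc hcond; omega
    · intro r c hr hc _
      rw [hphase.2 r c, pvGet_replicate]
      ring
  obtain ⟨_, h2⟩ := pvOuterFold skill n m board n (le_refl n)
    (skill.foldl pvF1 (List.replicate (n+1) (List.replicate (m+1) (0:Int)))) 0 hinv
  rw [h2]
  rfl

theorem pvE_cond (sk : List Int) (N M : Nat) (hok : pvSkOK N M sk) (i j : Nat) :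
    (PySem.List.pyGetD sk 1 0 ≤ (i:Int) ∧ (i:Int) ≤ PySem.List.pyGetD sk 3 0 ∧
     PySem.List.pyGetD sk 2 0 ≤ (j:Int) ∧ (j:Int) ≤ PySem.List.pyGetD sk 4 0) ↔
    (pvR1 sk ≤ i ∧ i + 1 ≤ pvR2 sk ∧ pvC1 sk ≤ j ∧ j + 1 ≤ pvC2 sk) := by
  obtain ⟨o1, o2, o3, o4, o5, o6⟩ := hok
  unfold pvR1 pvR2 pvC1 pvC2
  omega

theorem pvE_fold (skill : List (List Int)) (N M : Nat)
    (hsk : ∀ sk ∈ skill, pvSkOK N M sk) (i j : Nat) :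
    ∀ (acc : Int),
      skill.foldl (fun e sk =>
        if PySem.List.pyGetD sk 1 0 ≤ (i:Int) ∧ (i:Int) ≤ PySem.List.pyGetD sk 3 0 ∧
           PySem.List.pyGetD sk 2 0 ≤ (j:Int) ∧ (j:Int) ≤ PySem.List.pyGetD sk 4 0
        then e + pvDeg sk else e) acc = acc + pvE skill i j := by
  induction skill with
  | nil => intro acc; simp [pvE]
  | cons sk l ih =>
    intro acc
    simp only [List.foldl_cons]
    rw [ih (fun s hs => hsk s (by simp [hs]))]
    have he : pvE (sk :: l) i j = pvRect sk i j + pvE l i j := by simp [pvE]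
    rw [he]
    by_cases h : pvR1 sk ≤ i ∧ i + 1 ≤ pvR2 sk ∧ pvC1 sk ≤ j ∧ j + 1 ≤ pvC2 sk
    · rw [if_pos ((pvE_cond sk N M (hsk sk (by simp)) i j).mpr h)]
      unfold pvRect
      rw [if_pos h]
      ring
    · rw [if_neg (fun hc => h ((pvE_cond sk N M (hsk sk (by simp)) i j).mp hc))]
      unfold pvRect
      rw [if_neg h]
      ring

theorem solutionB (board skill : List (List Int))
    (hsk : ∀ sk ∈ skill, pvSkOK board.length (board.headD []).length sk) :
    solution_alt board skill = pvCnt board (board.headD []).length (pvE skill) := by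
  simp only [solution_alt]
  rw [pvM_eq]
  unfold pvCnt
  apply PySem.List.foldl_congr_mem
  intro a k hk
  rw [List.mem_range] at hk
  apply PySem.List.foldl_congr_mem
  intro a' j hj
  rw [List.mem_range] at hj
  simp only [List.foldl_map]
  have hdeg : ∀ sk : List Int,
      (if PySem.List.pyGetD sk 0 0 = 1 then -PySem.List.pyGetD sk 5 0
       else PySem.List.pyGetD sk 5 0) = pvDeg sk := fun _ => rfl
  simp only [hdeg]
  rw [pvE_fold skill board.length (board.headD []).length hsk k j 0]
  rw [zero_add]
  simp only [PySem.List.pyGetD_natCast]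
  rfl

-- ===== VERDICT (by name: the statement is the Claim_ definition above) =====
theorem solution_spec : Claim_equal_solution := by
  intro board skill _hdom hpre
  unfold Spec_solution
  obtain ⟨_hne, _hrow, hskpre⟩ := hpre
  have hsk : ∀ sk ∈ skill, pvSkOK board.length (board.headD []).length sk := by
    intro sk hs
    exact (hskpre sk hs).2
  rw [solutionA board skill hsk, solutionB board skill hsk]
  have hE : pvQ (pvCC skill) = pvE skill := funext fun i => funext fun j =>
    pvQ_list skill (fun sk hs => by
      obtain ⟨o1, o2, o3, o4, o5, o6⟩ := hsk sk hs
      exact ⟨by unfold pvR1 pvR2; omega, by unfold pvC1 pvC2; omega⟩) i j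
  rw [hE]
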